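-- pv_equiv track=rewrite | github.com/natosit-dev/piqitt-contest | scripts/summarize_piqi_scores.py | count_details
-- ===== SOURCE A (Python) =====
-- from typing import Any, Dict, List, Tuple
--
-- def count_details(details: Any) -> Tuple[int, int, int, int]:
--     """
--     Returns: (pass_count, fail_count, skip_count, critical_fail_count)
--     """
--     pass_count = fail_count = skip_count = critical_fail_count = 0
--
--     if not isinstance(details, list):
--         return pass_count, fail_count, skip_count, critical_fail_count
--
--     for d in details:
--         if not isinstance(d, dict):
--             continue
--         status = str(d.get("status", "")).upper()
--         severity = str(d.get("severity", "")).lower()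
--
--         if status == "PASS":
--             pass_count += 1
--         elif status == "FAIL":
--             fail_count += 1
--             if severity == "critical":
--                 critical_fail_count += 1
--         elif status == "SKIP":
--             skip_count += 1
--
--     return pass_count, fail_count, skip_count, critical_fail_count
-- ===== SOURCE B (Python) =====
-- def count_details(details):
--     """
--     Returns: (pass_count, fail_count, skip_count, critical_fail_count)
--     """
--     if not isinstance(details, list):
--         return 0, 0, 0, 0
--
--     keys = [(str(d.get("status", "")).upper(), str(d.get("severity", "")).lower())
--             for d in details if isinstance(d, dict)]
--
--     table = {}
--     for k in keys:
--         table[k] = table.get(k, 0) + 1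
--
--     pass_count = sum(v for k, v in table.items() if k[0] == "PASS")
--     fail_count = sum(v for k, v in table.items() if k[0] == "FAIL")
--     skip_count = sum(v for k, v in table.items() if k[0] == "SKIP")
--     critical_fail_count = table.get(("FAIL", "critical"), 0)
--     return pass_count, fail_count, skip_count, critical_fail_count
-- ===== Notes on version B (the rewrite author's own statement) =====
-- stated objective: alternative
-- what changed: Instead of one loop with four running accumulators, B first builds a frequency table keyed by the normalized (status, severity) pair and then derives the four results from the table: per-status sums over the table entries and a single lookup at (FAIL, critical).
import Mathlib
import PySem

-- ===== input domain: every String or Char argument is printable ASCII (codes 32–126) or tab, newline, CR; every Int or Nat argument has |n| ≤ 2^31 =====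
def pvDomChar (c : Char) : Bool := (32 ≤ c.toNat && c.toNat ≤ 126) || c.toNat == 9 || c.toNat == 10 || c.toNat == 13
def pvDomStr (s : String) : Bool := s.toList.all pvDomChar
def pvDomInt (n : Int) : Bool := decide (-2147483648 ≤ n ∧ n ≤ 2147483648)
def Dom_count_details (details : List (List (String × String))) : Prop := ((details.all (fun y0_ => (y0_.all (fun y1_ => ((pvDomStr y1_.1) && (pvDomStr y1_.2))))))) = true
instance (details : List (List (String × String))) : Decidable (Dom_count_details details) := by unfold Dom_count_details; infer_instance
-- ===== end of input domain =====

-- B builds a frequency table keyed by the normalized (status, severity) pair first, then derives the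
-- four results from the table (per-status sums plus one lookup); same cost, different decomposition.

-- ===== PORT A =====
-- the 'if not isinstance(details, list)' / 'if not isinstance(d, dict)' guards never fire under the
-- type convention (details : List of dicts), so the early return / 'continue' are omitted.
def stepA (acc : Int × Int × Int × Int) (d : List (String × String)) : Int × Int × Int × Int :=
  let status := PySem.Str.upper ((PySem.Dict.mk d).getD "status" "")
  let severity := PySem.Str.lower ((PySem.Dict.mk d).getD "severity" "")
  if status == "PASS" then (acc.1 + 1, acc.2.1, acc.2.2.1, acc.2.2.2)
  else if status == "FAIL" then
    (acc.1, acc.2.1 + 1, acc.2.2.1,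
     if severity == "critical" then acc.2.2.2 + 1 else acc.2.2.2)
  else if status == "SKIP" then (acc.1, acc.2.1, acc.2.2.1 + 1, acc.2.2.2)
  else acc

def count_details (details : List (List (String × String))) : Int × Int × Int × Int :=
  details.foldl stepA ((0 : Int), (0 : Int), (0 : Int), (0 : Int))

-- ===== PORT B =====
-- the normalized (status, severity) key of one entry
def pvKey (d : List (String × String)) : String × String :=
  (PySem.Str.upper ((PySem.Dict.mk d).getD "status" ""),
   PySem.Str.lower ((PySem.Dict.mk d).getD "severity" ""))

-- sum(v for k, v in table.items() if k[0] == s)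
def pvSumWhere (table : PySem.Dict (String × String) Int) (s : String) : Int :=
  ((table.items.filter (fun kv => kv.1.1 == s)).map (·.2)).sum

def count_details_alt (details : List (List (String × String))) : Int × Int × Int × Int :=
  let keys := details.map pvKey
  let table := keys.foldl (fun t k => t.insert k (t.getD k 0 + 1)) PySem.Dict.empty
  (pvSumWhere table "PASS", pvSumWhere table "FAIL", pvSumWhere table "SKIP",
   table.getD ("FAIL", "critical") 0)

-- ===== PRECONDITION & SPEC =====
def Spec_count_details (details : List (List (String × String))) (out : Int × Int × Int × Int) : Prop := out = count_details_alt details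
instance (details : List (List (String × String))) (out : Int × Int × Int × Int) : Decidable (Spec_count_details details out) := by unfold Spec_count_details; infer_instance

-- ===== CLAIM (what is proved, stated in full; the proofs are below) =====
def Claim_equal_count_details : Prop := ∀ (details : List (List (String × String))), Dom_count_details details → Spec_count_details details (count_details details)

-- ===== LEMMAS AND PROOFS =====

-- one step of A's loop adds the four indicators of the normalized key
lemma stepA_eq (acc : Int × Int × Int × Int) (d : List (String × String)) :
    stepA acc d =
      (acc.1 + (if (pvKey d).1 == "PASS" then (1 : Int) else 0),
       acc.2.1 + (if (pvKey d).1 == "FAIL" then (1 : Int) else 0),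
       acc.2.2.1 + (if (pvKey d).1 == "SKIP" then (1 : Int) else 0),
       acc.2.2.2 + (if ((pvKey d).1 == "FAIL" && (pvKey d).2 == "critical") then (1 : Int) else 0)) := by
  unfold stepA pvKey
  by_cases h1 : PySem.Str.upper ((PySem.Dict.mk d).getD "status" "") = "PASS" <;>
  by_cases h2 : PySem.Str.upper ((PySem.Dict.mk d).getD "status" "") = "FAIL" <;>
  by_cases h3 : PySem.Str.upper ((PySem.Dict.mk d).getD "status" "") = "SKIP" <;>
  by_cases h4 : PySem.Str.lower ((PySem.Dict.mk d).getD "severity" "") = "critical" <;>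
    simp_all

-- A's loop adds the four countP's to the accumulator
lemma countA_loop (ds : List (List (String × String))) (a b c e : Int) :
    ds.foldl stepA (a, b, c, e)
    = (a + (ds.countP (fun d => (pvKey d).1 == "PASS") : Int),
       b + (ds.countP (fun d => (pvKey d).1 == "FAIL") : Int),
       c + (ds.countP (fun d => (pvKey d).1 == "SKIP") : Int),
       e + (ds.countP (fun d => (pvKey d).1 == "FAIL" && (pvKey d).2 == "critical") : Int)) := by
  induction ds generalizing a b c e with
  | nil => simp
  | cons d ds ih =>
    rw [List.foldl_cons, stepA_eq, ih]
    simp only [List.countP_cons, Prod.mk.injEq]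
    refine ⟨?_, ?_, ?_, ?_⟩ <;> push_cast <;> ring

-- a nodup list's sum of indicators of x is its membership indicator
lemma sum_indicator {κ : Type} [DecidableEq κ] (l : List κ) (hn : l.Nodup) (x : κ) :
    (l.map (fun k => if x = k then (1 : Int) else 0)).sum = if x ∈ l then 1 else 0 := by
  induction l with
  | nil => simp
  | cons y l ih =>
    rcases List.nodup_cons.mp hn with ⟨hy, hn'⟩
    by_cases hxy : x = y
    · subst hxy
      have h0 : (l.map (fun k => if x = k then (1 : Int) else 0)).sum = 0 := by
        apply List.sum_eq_zero
        intro v hv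
        rcases List.mem_map.mp hv with ⟨k, hk, rfl⟩
        have hne : x ≠ k := fun h => hy (h ▸ hk)
        simp [hne]
      simp [h0]
    · simp [hxy, ih hn']

-- summing the multiplicities of the keys of a nodup list l (covering xs) that satisfy p
-- counts the elements of xs satisfying p
lemma sum_count_filter {κ : Type} [BEq κ] [LawfulBEq κ] [DecidableEq κ] (xs l : List κ) (p : κ → Bool)
    (hn : l.Nodup) (hm : ∀ k ∈ xs, k ∈ l) :
    ((l.filter p).map (fun k => ((xs.count k : Nat) : Int))).sum = (xs.countP p : Int) := by
  induction xs with
  | nil => simp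
  | cons x xs ih =>
    have hx : x ∈ l := hm x (by simp)
    have hm' : ∀ k ∈ xs, k ∈ l := fun k hk => hm k (by simp [hk])
    have hsplit : ((l.filter p).map (fun k => (((x :: xs).count k : Nat) : Int))).sum
        = ((l.filter p).map (fun k => ((xs.count k : Nat) : Int))).sum
          + ((l.filter p).map (fun k => if x = k then (1 : Int) else 0)).sum := by
      rw [← List.sum_map_add]
      congr 1
      apply List.map_congr_left
      intro k _
      by_cases hxk : x = k
      · subst hxk; simp
      · simp [hxk]
    rw [hsplit, ih hm', sum_indicator _ (hn.filter p) x, List.countP_cons]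
    by_cases hpx : p x
    · have : x ∈ l.filter p := List.mem_filter.mpr ⟨hx, hpx⟩
      simp [hpx, this]
    · have hno : x ∉ l.filter p := fun h => hpx (List.of_mem_filter h)
      simp [hpx, hno]

-- B's per-status sum over the frequency table counts the keys with that status
lemma sumWhere_counter (keys : List (String × String)) (s : String) :
    pvSumWhere (PySem.Dict.counter keys) s = (keys.countP (fun k => k.1 == s) : Int) := by
  unfold pvSumWhere
  rw [PySem.Dict.items_counter, List.filter_map, List.map_map]
  simp only [Function.comp_def]
  exact sum_count_filter keys _ _ (PySem.Set.nodup_ofList keys)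
    (fun k hk => (PySem.Set.mem_ofList keys k).mpr hk)

-- ===== VERDICT (by name: the statement is the Claim_ definition above) =====
theorem count_details_spec : Claim_equal_count_details := by
  intro details _
  show count_details details = count_details_alt details
  unfold count_details count_details_alt
  rw [countA_loop]
  simp only [PySem.Dict.foldl_insert_getD_add_one_eq_counter, sumWhere_counter,
    PySem.Dict.getD_counter, List.count_eq_countP, List.countP_map, zero_add]
  refine congrArg₂ Prod.mk ?_ (congrArg₂ Prod.mk ?_ (congrArg₂ Prod.mk ?_ ?_)) <;> norm_cast
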